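-- pv_equiv track=rewrite | github.com/Buhwi/coding_study | greedy/exam/1_모험가 길드.py | solution
-- ===== SOURCE A (Python) =====
-- def solution(n, array):
--     answer = 0
--     array.sort()
--
--     while True:
--         if not array:
--             break
--
--         a = max(array)
--         n = len(array)
--
--         if n-a >= 0:
--             answer += 1
--             array = array[:n-a:]
--         else:
--             answer += 1
--             break
--
--     return answer
-- ===== SOURCE B (Python) =====
-- # B: sort once, walk the sorted list by a length index k, using s[k-1] as the
-- # current maximum instead of rescanning with max() and re-slicing (A's O(n^2)
-- # chop loop becomes O(n log n)).  Note: A sorts `array` in place; B does not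
-- # mutate its argument — the equivalence claimed is about the return value only.
-- def solution(n, array):
--     s = sorted(array)
--     answer = 0
--     k = len(s)
--     while k > 0:
--         answer += 1
--         if s[k - 1] > k:
--             break
--         k -= s[k - 1]
--     return answer
-- ===== Notes on version B (the rewrite author's own statement) =====
-- stated objective: faster
-- what changed: Instead of A's repeated max() rescan and list re-slicing on each group, B sorts once and walks a single length index k, reading the current maximum as s[k-1] and decrementing k, so the whole loop is O(n) after the sort.
-- outside the precondition, e.g. on solution(0, [0, 2, 2, 2]): A returns 2, B returns 2
import Mathlib
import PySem

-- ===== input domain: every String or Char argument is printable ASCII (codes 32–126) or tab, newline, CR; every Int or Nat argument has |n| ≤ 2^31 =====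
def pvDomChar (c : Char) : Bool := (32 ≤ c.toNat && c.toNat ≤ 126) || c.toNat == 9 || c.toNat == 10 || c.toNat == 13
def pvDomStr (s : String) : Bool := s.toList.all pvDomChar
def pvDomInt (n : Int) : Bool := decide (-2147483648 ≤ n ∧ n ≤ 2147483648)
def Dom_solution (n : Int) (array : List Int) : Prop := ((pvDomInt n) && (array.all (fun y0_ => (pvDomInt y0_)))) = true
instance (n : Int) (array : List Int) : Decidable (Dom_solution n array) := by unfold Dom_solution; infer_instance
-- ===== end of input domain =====

-- B sorts once and walks a length index, reading the running maximum as s[k-1]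
-- instead of A's per-group max() rescan and re-slicing (A sorts its argument in
-- place; the equivalence proved here is about the return value only).


-- ===== PORT A =====
-- A's `while True` chop loop; the fuel (length + 1) is only a totality guard:
-- inside Pre_ every chop removes at least one element (or the loop ends),
-- so the fuel never runs out.
def solutionLoopA : Nat → Int → List Int → Int
  | 0, answer, _ => answer
  | fuel + 1, answer, array =>
    if array = [] then answer
    else
      match PySem.List.max? array (fun x => x) with
      | none => answer
      | some a =>
        let n : Int := array.length
        if 0 ≤ n - a then
          solutionLoopA fuel (answer + 1) (PySem.List.slice array none (some (n - a)))
        else answer + 1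

def solution (n : Int) (array : List Int) : Int :=
  solutionLoopA (array.length + 1) 0 (PySem.List.sorted array (fun x => x) false)

-- ===== PORT B =====
-- B's `while k > 0` loop; same fuel guard.  pyGet? = none is Python's
-- IndexError (unreachable inside Pre_).
def solutionLoopB : Nat → Int → Int → List Int → Int
  | 0, answer, _, _ => answer
  | fuel + 1, answer, k, s =>
    if k ≤ 0 then answer
    else
      match PySem.List.pyGet? s (k - 1) with
      | none => answer + 1
      | some a =>
        if k < a then answer + 1
        else solutionLoopB fuel (answer + 1) (k - a) s

def solution_alt (n : Int) (array : List Int) : Int :=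
  let s := PySem.List.sorted array (fun x => x) false
  solutionLoopB (s.length + 1) 0 (s.length : Int) s

-- ===== PRECONDITION & SPEC =====
-- Pre_ excludes arrays that contain a nonpositive element while the maximum is
-- below the length: on such inputs A's chop loop can reach a nonempty prefix
-- whose maximum is nonpositive and then loops forever (and B's index walk
-- raises IndexError), and the exact set of inputs where A still terminates
-- there is not expressible without simulating the loop.
def Pre_solution (n : Int) (array : List Int) : Prop :=
  array = [] ∨ (∀ x ∈ array, 1 ≤ x) ∨ (∃ x ∈ array, (array.length : Int) ≤ x)
instance (n : Int) (array : List Int) : Decidable (Pre_solution n array) := by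
  unfold Pre_solution; infer_instance
def pvWitness_solution : Int × List Int := (4, [1, 2, 2, 3])
def Spec_solution (n : Int) (array : List Int) (out : Int) : Prop := out = solution_alt n array
instance (n : Int) (array : List Int) (out : Int) : Decidable (Spec_solution n array out) := by unfold Spec_solution; infer_instance

-- ===== CLAIM (what is proved, stated in full; the proofs are below) =====
def Claim_equal_solution : Prop := ∀ (n : Int) (array : List Int), Dom_solution n array → Pre_solution n array → Spec_solution n array (solution n array)

-- ===== LEMMAS AND PROOFS =====

-- On a ≤-sorted list, max() of the first k elements is the element at index k-1.
theorem max_take_sorted (s : List Int) (hp : s.Pairwise (· ≤ ·)) (k : Nat)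
    (hk1 : 1 ≤ k) (hk : k ≤ s.length) (hlen : k - 1 < s.length) :
    PySem.List.max? (s.take k) (fun x => x) = some s[k - 1] := by
  have hne : s.take k ≠ [] := by
    intro h
    have h0 := congrArg List.length h
    rw [List.length_take] at h0
    simp at h0
    rcases h0 with h0 | h0
    · omega
    · subst h0; simp at hk; omega
  obtain ⟨m, hm⟩ : ∃ m, PySem.List.max? (s.take k) (fun x => x) = some m := by
    cases h : PySem.List.max? (s.take k) (fun x => x) with
    | none => exact absurd ((PySem.List.max?_eq_none_iff (s.take k) (fun x => x)).mp h) hne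
    | some m => exact ⟨m, rfl⟩
  rw [hm]
  have hmem : m ∈ s.take k := PySem.List.max?_mem hm
  have hlast_mem : s[k-1] ∈ s.take k := by
    have h0 : (s.take k)[k-1]'(by simp; omega) = s[k-1] := List.getElem_take
    rw [← h0]; exact List.getElem_mem _
  have h1 : s[k-1] ≤ m := PySem.List.max?_isMax hm _ hlast_mem
  have h2 : m ≤ s[k-1] := by
    obtain ⟨j, hj, hje⟩ := List.getElem_of_mem hmem
    have hjlt : j < k := by simp at hj; omega
    have hje' : m = s[j]'(by omega) := by
      rw [← hje]; exact List.getElem_take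
    rcases Nat.lt_or_ge j (k-1) with h | h
    · have := (List.pairwise_iff_getElem.mp hp) j (k-1) (by omega) hlen h
      rw [hje']; exact this
    · have hjeq : j = k - 1 := by omega
      subst hjeq; rw [hje']
  have : m = s[k-1] := le_antisymm h2 h1
  rw [this]

-- s[k-1] read through Python indexing, for 1 ≤ k ≤ len(s).
theorem pyGet_pred (s : List Int) (k : Nat) (hk1 : 1 ≤ k) (hk : k - 1 < s.length) :
    PySem.List.pyGet? s ((k : Int) - 1) = some s[k - 1] := by
  have h : (k : Int) - 1 = ((k - 1 : Nat) : Int) := by omega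
  rw [h]
  simp [pysem, hk]

-- The last element of a ≤-sorted list bounds every member.
theorem last_is_max (s : List Int) (hp : s.Pairwise (· ≤ ·)) (x : Int) (hx : x ∈ s)
    (hlen : s.length - 1 < s.length) : x ≤ s[s.length - 1] := by
  obtain ⟨j, hj, hje⟩ := List.getElem_of_mem hx
  rcases Nat.lt_or_ge j (s.length - 1) with h | h
  · exact hje ▸ (List.pairwise_iff_getElem.mp hp) j (s.length - 1) hj hlen h
  · have : j = s.length - 1 := by omega
    subst this; omega

-- Core correspondence for an all-positive sorted list: A's state (the first-k
-- prefix of s) runs in lockstep with B's state (the index k).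
theorem loop_eq (s : List Int) (hp : s.Pairwise (· ≤ ·)) (hpos : ∀ x ∈ s, 1 ≤ x) :
    ∀ fuel (answer : Int) (k : Nat), k ≤ s.length →
      solutionLoopA fuel answer (s.take k) = solutionLoopB fuel answer (k : Int) s := by
  intro fuel
  induction fuel with
  | zero => intro answer k hk; rfl
  | succ fuel ih =>
    intro answer k hk
    rcases Nat.eq_zero_or_pos k with h0 | h0
    · subst h0
      simp [solutionLoopA, solutionLoopB]
    · have hk1 : 1 ≤ k := h0
      have hlen : k - 1 < s.length := by omega
      have hne : s.take k ≠ [] := by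
        intro h
        have h0 := congrArg List.length h
        rw [List.length_take] at h0
        simp at h0
        rcases h0 with h0 | h0
        · omega
        · subst h0; simp at hk; omega
      have hknot : ¬ ((k : Int) ≤ 0) := by omega
      rw [solutionLoopA, solutionLoopB, if_neg hne, if_neg hknot,
          max_take_sorted s hp k hk1 hk hlen, pyGet_pred s k hk1 hlen]
      set a := s[k-1] with ha
      have hlength : ((s.take k).length : Int) = (k : Int) := by
        rw [List.length_take]; omega
      have hapos : 1 ≤ a := hpos _ (List.getElem_mem _)
      simp only [hlength]
      by_cases hc : 0 ≤ (k : Int) - a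
      · rw [if_pos hc, if_neg (by omega : ¬ (k : Int) < a)]
        have hstop : PySem.List.slice (s.take k) none (some ((k : Int) - a)) =
            s.take ((k : Int) - a).toNat := by
          rw [PySem.List.slice_to _ hc, List.take_take]
          congr 1
          omega
        rw [hstop]
        have hcast : ((( (k : Int) - a).toNat : Int)) = (k : Int) - a := by omega
        rw [← hcast]
        exact ih (answer + 1) (((k : Int) - a).toNat) (by omega)
      · rw [if_neg hc, if_pos (by omega : (k : Int) < a)]

-- ===== VERDICT (by name: the statement is the Claim_ definition above) =====
theorem solution_spec : Claim_equal_solution := by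
  intro n array _hdom hpre
  unfold Pre_solution at hpre
  show solution n array = solution_alt n array
  unfold solution solution_alt
  set s := PySem.List.sorted array (fun x => x) false with hs
  have hlen : s.length = array.length := PySem.List.length_sorted array (fun x => x) false
  have hp : s.Pairwise (· ≤ ·) := by
    have := PySem.List.sorted_pairwise array (fun x => x)
    simpa [← hs] using this
  rcases hpre with h | h | h
  · subst h
    rfl
  · have hpos : ∀ x ∈ s, 1 ≤ x := fun x hx => h x ((PySem.List.mem_sorted _ _ _ _).mp hx)
    have := loop_eq s hp hpos (s.length + 1) 0 s.length (le_refl _)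
    rw [List.take_length] at this
    rw [← hlen]
    exact this
  · obtain ⟨x, hx, hxle⟩ := h
    have hxs : x ∈ s := (PySem.List.mem_sorted _ _ _ _).mpr hx
    have hne : s ≠ [] := List.ne_nil_of_mem hxs
    have hm1 : 1 ≤ s.length := List.length_pos_iff.mpr hne
    have hlt : s.length - 1 < s.length := by omega
    set m := s.length with hm
    have hmax : PySem.List.max? s (fun x => x) = some s[m - 1] := by
      have := max_take_sorted s hp m hm1 (le_refl _) hlt
      rwa [List.take_length] at this
    have hget : PySem.List.pyGet? s ((m : Int) - 1) = some s[m - 1] := pyGet_pred s m hm1 hlt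
    set a := s[m - 1] with ha
    have hma : (m : Int) ≤ a := by
      have h1 : x ≤ a := last_is_max s hp x hxs hlt
      have h2 : (m : Int) = (array.length : Int) := by exact_mod_cast hlen
      omega
    rw [← hlen]
    show solutionLoopA (m + 1) 0 s = solutionLoopB (m + 1) 0 ((m : Int)) s
    rw [solutionLoopA, solutionLoopB, if_neg hne, if_neg (by omega : ¬ ((m : Int) ≤ 0)),
        hmax, hget]
    simp only
    rcases lt_or_eq_of_le hma with hgt | heq
    · rw [if_neg (by push_cast; omega : ¬ (0 ≤ (s.length : Int) - a)),
          if_pos (by push_cast; omega : (m : Int) < a)]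
    · rw [if_pos (by push_cast; omega : 0 ≤ (s.length : Int) - a),
          if_neg (by omega : ¬ ((m : Int) < a))]
      have hslice : PySem.List.slice s none (some ((s.length : Int) - a)) = [] := by
        rw [PySem.List.slice_to _ (by push_cast; omega)]
        have : ((s.length : Int) - a).toNat = 0 := by push_cast; omega
        rw [this, List.take_zero]
      rw [hslice]
      have hz : (m : Int) - a = 0 := by omega
      rw [hz]
      rcases Nat.exists_eq_add_of_le hm1 with ⟨f, hf⟩
      rw [Nat.add_comm] at hf
      rw [hf]
      simp [solutionLoopA, solutionLoopB]
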